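-- pv_equiv track=rewrite | github.com/longle2718/learnCS | bits/bits.py | ffs
-- ===== SOURCE A (Python) =====
-- def ffs(x):
--     # find first set/one
--     if x == 0:
--         return 0
--     mask = 1
--     cnt = 0
--     while x & mask == 0:
--         mask <<= 1
--         cnt += 1
--     return cnt
-- ===== SOURCE B (Python) =====
-- def ffs(x):
--     # find first set/one
--     if x == 0:
--         return 0
--     return (x & -x).bit_length() - 1
-- ===== Notes on version B (the rewrite author's own statement) =====
-- stated objective: idiomatic
-- what changed: replaces the mask-shifting test loop with the standard lowest-set-bit trick: isolate the bit with x & -x and read off its position via bit_length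
import Mathlib
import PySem

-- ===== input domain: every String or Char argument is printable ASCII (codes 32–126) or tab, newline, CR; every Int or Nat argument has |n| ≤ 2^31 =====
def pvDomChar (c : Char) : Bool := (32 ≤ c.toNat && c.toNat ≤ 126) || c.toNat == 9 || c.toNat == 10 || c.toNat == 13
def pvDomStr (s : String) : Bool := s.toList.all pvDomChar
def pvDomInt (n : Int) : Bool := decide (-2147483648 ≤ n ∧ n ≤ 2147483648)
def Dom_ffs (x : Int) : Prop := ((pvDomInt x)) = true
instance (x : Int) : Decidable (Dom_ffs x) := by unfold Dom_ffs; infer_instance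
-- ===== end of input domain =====

-- B replaces A's mask-shifting scan loop with the idiomatic lowest-set-bit trick: bit_length of (x & -x).


-- ===== PORT A =====
-- the while loop of A; the Nat fuel argument only makes the recursion total: on the
-- domain Dom_ffs (|x| <= 2^31) the lowest set bit index is <= 31, so 40 steps are never
-- exhausted where the claim applies (mask <<= 1 is ported as mask * 2, exact for mask >= 0)
def ffsLoop (x mask cnt : Int) : Nat → Int
  | 0 => cnt
  | fuel + 1 =>
      if PySem.Int.band x mask = 0 then ffsLoop x (mask * 2) (cnt + 1) fuel
      else cnt

def ffs (x : Int) : Int :=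
  if x = 0 then 0
  else ffsLoop x 1 0 40

-- ===== PORT B =====
def ffs_alt (x : Int) : Int :=
  if x = 0 then 0
  else (PySem.Int.bitLength (PySem.Int.band x (-x)) : Int) - 1

-- ===== PRECONDITION & SPEC =====
def Spec_ffs (x : Int) (out : Int) : Prop := out = ffs_alt x
instance (x : Int) (out : Int) : Decidable (Spec_ffs x out) := by unfold Spec_ffs; infer_instance

-- ===== CLAIM (what is proved, stated in full; the proofs are below) =====
def Claim_equal_ffs : Prop := ∀ (x : Int), Dom_ffs x → Spec_ffs x (ffs x)

-- ===== LEMMAS AND PROOFS =====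


-- dividing an odd number and its predecessor by 2^j (j ≥ 1) gives the same quotient
lemma odd_pred_div (m j : ℕ) (hj : 1 ≤ j) (hm : m % 2 = 1) :
    (m - 1) / 2 ^ j = m / 2 ^ j := by
  have h2 : (2:ℕ) ∣ 2 ^ j := dvd_pow_self 2 (by omega)
  have hr2 : m % 2 ^ j % 2 = m % 2 := Nat.mod_mod_of_dvd m h2
  have hq := Nat.div_add_mod m (2 ^ j)
  have hpos : 0 < 2 ^ j := Nat.two_pow_pos j
  have hlt : m % 2 ^ j < 2 ^ j := Nat.mod_lt _ hpos
  have hr1 : 1 ≤ m % 2 ^ j := by omega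
  have hsplit : m - 1 = 2 ^ j * (m / 2 ^ j) + (m % 2 ^ j - 1) := by omega
  have h0 : (m % 2 ^ j - 1) / 2 ^ j = 0 := Nat.div_eq_of_lt (by omega)
  rw [hsplit, Nat.mul_add_div hpos, h0]
  omega

lemma even_pow_mul (k c m : ℕ) (h : c < k) : 2 ^ (k - c) * m % 2 = 0 := by
  obtain ⟨d, hd⟩ : ∃ d, k - c = d + 1 := ⟨k - c - 1, by omega⟩
  rw [hd, pow_succ', mul_assoc]
  exact Nat.mul_mod_right 2 _

-- bits of n = 2^k * m (m odd) at positions ≤ k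
lemma bit_n (k m c : ℕ) (hm : m % 2 = 1) (hc : c ≤ k) :
    (2 ^ k * m).testBit c = decide (c = k) := by
  rw [Nat.testBit_eq_decide_div_mod_eq]
  have hsplit : 2 ^ k * m = 2 ^ c * (2 ^ (k - c) * m) := by
    rw [← mul_assoc, ← pow_add]; congr 2; omega
  rw [hsplit, Nat.mul_div_cancel_left _ (Nat.two_pow_pos c)]
  rcases Nat.lt_or_ge c k with h | h
  · rw [even_pow_mul k c m h]
    simp [show c ≠ k by omega]
  · have hck : c = k := by omega
    subst hck
    simp [hm]

-- bits of n - 1 at positions ≤ k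
lemma bit_pred (k m c : ℕ) (hm : m % 2 = 1) (hc : c ≤ k) :
    (2 ^ k * m - 1).testBit c = decide (c < k) := by
  have hm1 : 1 ≤ m := by omega
  have hpc : 0 < 2 ^ c := Nat.two_pow_pos c
  have hA1 : 1 ≤ 2 ^ (k - c) * m := Nat.mul_pos (Nat.two_pow_pos _) (by omega)
  rw [Nat.testBit_eq_decide_div_mod_eq]
  have hsplit : 2 ^ k * m - 1 = 2 ^ c * (2 ^ (k - c) * m - 1) + (2 ^ c - 1) := by
    have hmul : 2 ^ k * m = 2 ^ c * (2 ^ (k - c) * m) := by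
      rw [← mul_assoc, ← pow_add]; congr 2; omega
    have hms : 2 ^ c * (2 ^ (k - c) * m - 1) = 2 ^ c * (2 ^ (k - c) * m) - 2 ^ c := by
      rw [Nat.mul_sub, mul_one]
    have hle : 2 ^ c ≤ 2 ^ c * (2 ^ (k - c) * m) := Nat.le_mul_of_pos_right _ (by omega)
    omega
  have h0 : (2 ^ c - 1) / 2 ^ c = 0 := Nat.div_eq_of_lt (by omega)
  rw [hsplit, Nat.mul_add_div hpc, h0, Nat.add_zero]
  rcases Nat.lt_or_ge c k with h | h
  · have heven := even_pow_mul k c m h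
    have hodd : (2 ^ (k - c) * m - 1) % 2 = 1 := by omega
    simp [hodd, h]
  · have hck : c = k := by omega
    subst hck
    simp only [Nat.sub_self, pow_zero, one_mul]
    have : (m - 1) % 2 = 0 := by omega
    simp [this]

-- bits of n and n-1 agree strictly above k
lemma bit_high (k m j : ℕ) (hm : m % 2 = 1) (hj : 1 ≤ j) :
    (2 ^ k * m - 1).testBit (k + j) = (2 ^ k * m).testBit (k + j) := by
  have hm1 : 1 ≤ m := by omega
  have hpk : 0 < 2 ^ k := Nat.two_pow_pos k
  rw [Nat.testBit_eq_decide_div_mod_eq, Nat.testBit_eq_decide_div_mod_eq]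
  have h1 : 2 ^ k * m / 2 ^ (k + j) = m / 2 ^ j := by
    rw [pow_add, Nat.mul_div_mul_left _ _ hpk]
  have h2 : (2 ^ k * m - 1) / 2 ^ (k + j) = (m - 1) / 2 ^ j := by
    rw [pow_add, ← Nat.div_div_eq_div_mul]
    congr 1
    have hle : 2 ^ k ≤ 2 ^ k * m := Nat.le_mul_of_pos_right _ (by omega)
    have hms : 2 ^ k * (m - 1) = 2 ^ k * m - 2 ^ k := by rw [Nat.mul_sub, mul_one]
    have hsplit : 2 ^ k * m - 1 = 2 ^ k * (m - 1) + (2 ^ k - 1) := by omega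
    have h0 : (2 ^ k - 1) / 2 ^ k = 0 := Nat.div_eq_of_lt (by omega)
    rw [hsplit, Nat.mul_add_div hpk, h0, Nat.add_zero]
  rw [h1, h2, odd_pred_div m j hj hm]

-- the core identity: n & (n-1) clears exactly the lowest set bit
lemma and_pred (k m : ℕ) (hm : m % 2 = 1) :
    2 ^ k * m &&& (2 ^ k * m - 1) = 2 ^ k * (m - 1) := by
  apply Nat.eq_of_testBit_eq
  intro i
  rw [Nat.testBit_and]
  rcases lt_trichotomy i k with h | h | h
  · have l1 : (2 ^ k * m).testBit i = false := by
      rw [bit_n k m i hm (by omega)]; simp [show i ≠ k by omega]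
    have r1 : (2 ^ k * (m - 1)).testBit i = false := by
      rw [Nat.testBit_two_pow_mul]; simp [show ¬ (i ≥ k) by omega]
    rw [l1, r1, Bool.false_and]
  · subst h
    have l2 : (2 ^ i * m - 1).testBit i = false := by
      rw [bit_pred i m i hm le_rfl]; simp
    have r2 : (2 ^ i * (m - 1)).testBit i = false := by
      rw [Nat.testBit_two_pow_mul]
      have h0 : (m - 1) % 2 = 0 := by omega
      simp [Nat.testBit_eq_decide_div_mod_eq, h0]
    rw [l2, r2, Bool.and_false]
  · obtain ⟨j, hj1, hj⟩ : ∃ j, 1 ≤ j ∧ i = k + j := ⟨i - k, by omega, by omega⟩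
    subst hj
    have e1 : (2 ^ k * m).testBit (k + j) = m.testBit j := by
      rw [Nat.testBit_two_pow_mul]
      simp
    have e2 : (2 ^ k * (m - 1)).testBit (k + j) = (m - 1).testBit j := by
      rw [Nat.testBit_two_pow_mul]
      simp
    have hmm : m.testBit j = (m - 1).testBit j := by
      rw [Nat.testBit_eq_decide_div_mod_eq, Nat.testBit_eq_decide_div_mod_eq,
          odd_pred_div m j hj1 hm]
    rw [bit_high k m j hm hj1, e1, e2, ← hmm, Bool.and_self]

lemma sub_and_pred (k m : ℕ) (hm : m % 2 = 1) :
    2 ^ k * m - (2 ^ k * m &&& (2 ^ k * m - 1)) = 2 ^ k := by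
  rw [and_pred k m hm, Nat.mul_sub, mul_one]
  exact Nat.sub_sub_self (Nat.le_mul_of_pos_right _ (by omega))

-- Python bit_length of 2^k
lemma bl_two_pow (k : ℕ) : PySem.Int.bitLength ((2 ^ k : ℕ) : Int) = k + 1 := by
  induction k with
  | zero =>
      rw [pow_zero, PySem.Int.bitLength_natCast (by norm_num)]
      norm_num [PySem.Int.bitLength_zero]
  | succ k ih =>
      rw [PySem.Int.bitLength_natCast (Nat.two_pow_pos _), pow_succ,
          Nat.mul_div_cancel _ (by omega)]
      omega

-- evaluating Python's  x & mask  (mask = 2^c) on both signs, c ≤ k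
lemma band_mask (x : Int) (k m c : ℕ) (hx : x ≠ 0) (hn : x.natAbs = 2 ^ k * m)
    (hm : m % 2 = 1) (hc : c ≤ k) :
    (PySem.Int.band x ((2 ^ c : ℕ) : Int) = 0) ↔ c < k := by
  have hpk : (0:ℕ) < 2 ^ k := Nat.two_pow_pos k
  have hpc : (0:ℕ) < 2 ^ c := Nat.two_pow_pos c
  have h2 : (0:Int) ≤ ((2 ^ c : ℕ) : Int) := by positivity
  rcases lt_or_gt_of_ne hx with hneg | hpos
  · -- x < 0
    have h1 : ¬ ((0:Int) ≤ x) := by omega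
    have htn : (-x - 1).toNat = 2 ^ k * m - 1 := by omega
    simp only [PySem.Int.band, h1, if_false, h2, if_true, Int.toNat_natCast, htn]
    rw [Nat.two_pow_and, bit_pred k m c hm hc]
    rcases Nat.lt_or_ge c k with h | h
    · simp [h]
    · have hck : c = k := by omega
      subst hck
      simp
  · -- x > 0
    have h1 : (0:Int) ≤ x := by omega
    have htn : x.toNat = 2 ^ k * m := by omega
    simp only [PySem.Int.band, h1, if_true, h2, Int.toNat_natCast, htn]
    rw [Nat.and_two_pow, bit_n k m c hm hc]
    rcases Nat.lt_or_ge c k with h | h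
    · simp [show c ≠ k by omega, h]
    · have hck : c = k := by omega
      subst hck
      simp

-- evaluating Python's  x & -x  on both signs: it is the isolated lowest set bit
lemma band_neg_self (x : Int) (k m : ℕ) (hx : x ≠ 0) (hn : x.natAbs = 2 ^ k * m)
    (hm : m % 2 = 1) :
    PySem.Int.band x (-x) = ((2 ^ k : ℕ) : Int) := by
  rcases lt_or_gt_of_ne hx with hneg | hpos
  · have h1 : ¬ ((0:Int) ≤ x) := by omega
    have h2 : (0:Int) ≤ -x := by omega
    have htb : (-x).toNat = 2 ^ k * m := by omega
    have hta : (-x - 1).toNat = 2 ^ k * m - 1 := by omega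
    simp only [PySem.Int.band, h1, if_false, h2, if_true, htb, hta]
    rw [sub_and_pred k m hm]
  · have h1 : (0:Int) ≤ x := by omega
    have h2 : ¬ ((0:Int) ≤ -x) := by omega
    have htb : x.toNat = 2 ^ k * m := by omega
    have hta : (-(-x) - 1).toNat = 2 ^ k * m - 1 := by
      rw [neg_neg]; omega
    simp only [PySem.Int.band, h1, if_true, h2, if_false, hta, htb]
    rw [sub_and_pred k m hm]

-- the loop counts up to the lowest set bit index k and stops there
lemma loop_eq (x : Int) (k m : ℕ) (hx : x ≠ 0) (hn : x.natAbs = 2 ^ k * m)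
    (hm : m % 2 = 1) :
    ∀ fuel c, c ≤ k → k < c + fuel →
      ffsLoop x ((2 ^ c : ℕ) : Int) (c : Int) fuel = (k : Int) := by
  intro fuel
  induction fuel with
  | zero => intro c hc hf; omega
  | succ fuel ih =>
      intro c hc hf
      rcases Nat.lt_or_ge c k with h | h
      · have hcond : PySem.Int.band x ((2 ^ c : ℕ) : Int) = 0 :=
          (band_mask x k m c hx hn hm hc).mpr h
        simp only [ffsLoop, hcond, if_true]
        have hmask : ((2 ^ c : ℕ) : Int) * 2 = ((2 ^ (c + 1) : ℕ) : Int) := by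
          push_cast; ring
        have hcnt : ((c : ℕ) : Int) + 1 = ((c + 1 : ℕ) : Int) := by push_cast; ring
        rw [hmask, hcnt]
        exact ih (c + 1) (by omega) (by omega)
      · have hck : c = k := by omega
        subst hck
        have hcond : ¬ (PySem.Int.band x ((2 ^ c : ℕ) : Int) = 0) := by
          rw [band_mask x c m c hx hn hm (le_refl c)]
          omega
        simp only [ffsLoop, hcond, if_false]

-- ===== VERDICT (by name: the statement is the Claim_ definition above) =====
theorem ffs_spec : Claim_equal_ffs := by
  intro x hdom
  unfold Dom_ffs pvDomInt at hdom
  simp only [decide_eq_true_eq] at hdom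
  unfold Spec_ffs ffs ffs_alt
  by_cases hx : x = 0
  · simp [hx]
  · simp only [hx, if_false]
    have hn0 : x.natAbs ≠ 0 := by
      intro h; exact hx (by omega)
    obtain ⟨k, m, hmodd, hn⟩ := Nat.exists_eq_two_pow_mul_odd hn0
    have hm : m % 2 = 1 := Nat.odd_iff.mp hmodd
    have hbound : x.natAbs ≤ 2 ^ 31 := by
      have : (2:ℕ) ^ 31 = 2147483648 := by norm_num
      omega
    have hk : k ≤ 31 := by
      by_contra hk
      have h1 : 2 ^ 32 ≤ 2 ^ k := Nat.pow_le_pow_right (by omega) (by omega)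
      have h2 : 2 ^ k ≤ 2 ^ k * m := Nat.le_mul_of_pos_right _ (by omega)
      have h3 : (2:ℕ) ^ 31 < 2 ^ 32 := by norm_num
      omega
    have hloop := loop_eq x k m hx hn hm 40 0 (by omega) (by omega)
    simp only [pow_zero, Nat.cast_one, Nat.cast_zero] at hloop
    rw [hloop, band_neg_self x k m hx hn hm, bl_two_pow k]
    push_cast
    ring
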